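-- pv_equiv track=rewrite | github.com/acu192/codewars | 2-morse_code_part_3/solution.py | to_counts
-- ===== SOURCE A (Python) =====
-- def to_counts(bits):
--     prev = None
--     count = 1
--     counts = []
--     for b in bits:
--         if prev is not None:
--             if b == prev:
--                 count += 1
--             else:
--                 counts.append((prev, count))
--                 count = 1
--         prev = b
--     if prev is not None:
--         counts.append((prev, count))
--     if counts and counts[0][0] == '0':
--         counts = counts[1:]
--     if counts and counts[-1][0] == '0':
--         counts = counts[:-1]
--     return counts
-- ===== SOURCE B (Python) =====
-- def to_counts(bits):
--     bs = list(bits)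
--     n = len(bs)
--     bounds = [i for i in range(n + 1) if i == 0 or i == n or bs[i] != bs[i - 1]]
--     runs = [(bs[bounds[j]], bounds[j + 1] - bounds[j]) for j in range(len(bounds) - 1)]
--     if runs and runs[0][0] == '0':
--         runs = runs[1:]
--     if runs and runs[-1][0] == '0':
--         runs = runs[:-1]
--     return runs
-- ===== Notes on version B (the rewrite author's own statement) =====
-- stated objective: alternative
-- what changed: Replaces A's one-pass state machine (pending prev/count, append on change, final flush) by a staged boundary-index construction: first collect all transition positions (0, every i with bits[i] != bits[i-1], and len(bits)), then build each run by subtracting adjacent boundary positions and indexing the bit at the left boundary; same leading/trailing zero-run trimming.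
import Mathlib
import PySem

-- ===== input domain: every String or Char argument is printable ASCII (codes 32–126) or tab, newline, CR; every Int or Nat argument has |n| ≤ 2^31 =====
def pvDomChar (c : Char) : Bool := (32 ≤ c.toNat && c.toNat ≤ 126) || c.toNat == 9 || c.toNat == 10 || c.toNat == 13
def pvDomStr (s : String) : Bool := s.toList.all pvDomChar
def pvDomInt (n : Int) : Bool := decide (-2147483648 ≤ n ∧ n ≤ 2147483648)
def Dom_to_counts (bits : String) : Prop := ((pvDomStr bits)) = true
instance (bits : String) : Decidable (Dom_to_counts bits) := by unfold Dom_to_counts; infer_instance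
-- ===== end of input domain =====

-- B rebuilds the run list from the positions of value transitions (boundary indices),
-- obtaining each run length by subtracting adjacent boundaries, instead of A's one-pass
-- prev/count state machine; objective: alternative decomposition, same O(n) cost.

-- shared trimming of a leading and then a trailing '0' run (identical code in both Pythons)
def trimZeros (counts : List (String × Int)) : List (String × Int) :=
  let c1 := match counts with
    | (s, _) :: rest => if s = "0" then rest else counts
    | [] => counts
  match c1.getLast? with
  | some (s, _) => if s = "0" then c1.dropLast else c1
  | none => c1

-- ===== PORT A =====
def stepA (st : Option Char × Int × List (String × Int)) (b : Char) :
    Option Char × Int × List (String × Int) :=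
  match st with
  | (some p, count, counts) =>
    if b = p then (some b, count + 1, counts)
    else (some b, 1, counts ++ [(String.ofList [p], count)])
  | (none, count, counts) => (some b, count, counts)

def to_counts (bits : String) : List (String × Int) :=
  trimZeros (match bits.toList.foldl stepA (none, 1, []) with
    | (some p, count, counts) => counts ++ [(String.ofList [p], count)]
    | (none, _, counts) => counts)

-- ===== PORT B =====
-- boundary predicate: i == 0 or i == n or bs[i] != bs[i-1]; the getD default is never
-- read at an in-range access because Python's `or` short-circuits before bs[i] on i == n
def boundaryP (bs : List Char) (i : Nat) : Bool :=
  i == 0 || i == bs.length || bs.getD i ' ' != bs.getD (i - 1) ' '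

def to_counts_alt (bits : String) : List (String × Int) :=
  let bs := bits.toList
  let n := bs.length
  let bounds := (List.range (n + 1)).filter (fun i => boundaryP bs i)
  let runs := (List.range (bounds.length - 1)).map
    (fun j => (String.ofList [bs.getD (bounds.getD j 0) ' '],
               ((bounds.getD (j + 1) 0 : Nat) : Int) - ((bounds.getD j 0 : Nat) : Int)))
  trimZeros runs

-- ===== PRECONDITION & SPEC =====
def Spec_to_counts (bits : String) (out : List (String × Int)) : Prop := out = to_counts_alt bits
instance (bits : String) (out : List (String × Int)) : Decidable (Spec_to_counts bits out) := by unfold Spec_to_counts; infer_instance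

-- ===== CLAIM (what is proved, stated in full; the proofs are below) =====
def Claim_equal_to_counts : Prop := ∀ (bits : String), Dom_to_counts bits → Spec_to_counts bits (to_counts bits)

-- ===== LEMMAS AND PROOFS =====

-- ---- generic helpers ----
theorem string_mk_single_inj (b p : Char) (h : String.ofList [b] = String.ofList [p]) : b = p := by
  have := congrArg String.toList h
  simp at this
  exact this

-- adjacent-pair map over indices = zipWith over the list and its tail
theorem map_range_adj {beta : Type} (f : Nat → Nat → beta) : ∀ (L : List Nat),
    (List.range (L.length - 1)).map (fun j => f (L.getD j 0) (L.getD (j + 1) 0))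
      = List.zipWith f L L.tail
  | [] => by simp
  | [a] => by simp
  | a :: b :: t => by
    have ih := map_range_adj f (b :: t)
    simp only [List.length_cons, Nat.add_sub_cancel] at ih ⊢
    rw [List.range_succ_eq_map, List.map_cons, List.map_map]
    simp only [Function.comp_def, List.getD_cons_zero, List.getD_cons_succ]
    simp only [List.tail_cons] at ih ⊢
    rw [List.zipWith_cons_cons]
    exact congrArg _ ih

-- getD through replicate-prefix append
theorem getD_repl_left (k : Nat) (c : Char) (rest : List Char) (j : Nat) (h : j < k) :
    (List.replicate k c ++ rest).getD j ' ' = c := by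
  rw [List.getD_eq_getElem?_getD, List.getElem?_append_left (by simpa using h),
    List.getElem?_replicate, if_pos h]
  rfl

theorem getD_repl_right (k : Nat) (c : Char) (rest : List Char) (i : Nat) (h : k ≤ i) :
    (List.replicate k c ++ rest).getD i ' ' = rest.getD (i - k) ' ' := by
  rw [List.getD_eq_getElem?_getD, List.getElem?_append_right (by simpa using h),
    List.getD_eq_getElem?_getD, List.length_replicate]

-- ---- A-side: the fold with (prev, count) state, in continuation form ----
def contA : List Char → Char → Int → List (String × Int)
  | [], p, c => [(String.ofList [p], c)]
  | b :: xs, p, c => if b = p then contA xs p (c + 1) else (String.ofList [p], c) :: contA xs b 1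

def mergeH (s : String) (c : Int) (r : List (String × Int)) : List (String × Int) :=
  match r with
  | (s', c') :: t => if s' = s then (s, c + c') :: t else (s, c) :: r
  | [] => [(s, c)]

def stepH (runs : List (String × Int)) (ch : Char) : List (String × Int) :=
  match runs with
  | (s, c) :: rest =>
    if s = String.ofList [ch] then (String.ofList [ch], c + 1) :: rest
    else (String.ofList [ch], 1) :: runs
  | [] => [(String.ofList [ch], 1)]

def rleA (l : List Char) : List (String × Int) := l.foldr (fun x y => stepH y x) []

theorem stepH_eq_mergeH (r : List (String × Int)) (ch : Char) :
    stepH r ch = mergeH (String.ofList [ch]) 1 r := by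
  cases r with
  | nil => rfl
  | cons h t =>
    obtain ⟨s, c⟩ := h
    simp only [stepH, mergeH]
    by_cases hs : s = String.ofList [ch]
    · simp [hs]; omega
    · simp [hs]

theorem finA_eq_contA (l : List Char) (p : Char) (c : Int) (acc : List (String × Int)) :
    (match l.foldl stepA (some p, c, acc) with
     | (some q, cnt, cs) => cs ++ [(String.ofList [q], cnt)]
     | (none, _, cs) => cs) = acc ++ contA l p c := by
  induction l generalizing p c acc with
  | nil => simp [contA]
  | cons b xs ih =>
    simp only [List.foldl_cons, stepA, contA]
    by_cases hb : b = p
    · subst hb; simp [ih]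
    · simp [hb, ih]

theorem mergeH_ne (s s' : String) (c c' : Int) (r : List (String × Int)) (h : s' ≠ s) :
    mergeH s c (mergeH s' c' r) = (s, c) :: mergeH s' c' r := by
  cases r with
  | nil => simp [mergeH, h]
  | cons hd t =>
    obtain ⟨t1, t2⟩ := hd
    simp only [mergeH]
    by_cases ht : t1 = s'
    · simp [ht, h]
    · simp [ht, h]

theorem mergeH_merge (s : String) (c : Int) (r : List (String × Int)) :
    mergeH s c (mergeH s 1 r) = mergeH s (c + 1) r := by
  cases r with
  | nil => simp [mergeH]
  | cons hd t =>
    obtain ⟨t1, t2⟩ := hd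
    simp only [mergeH]
    by_cases ht : t1 = s
    · simp [ht]; omega
    · simp [ht]

theorem contA_eq_foldr (l : List Char) (p : Char) (c : Int) :
    contA l p c = mergeH (String.ofList [p]) c (rleA l) := by
  induction l generalizing p c with
  | nil => rfl
  | cons b xs ih =>
    have hfold : rleA (b :: xs) = mergeH (String.ofList [b]) 1 (rleA xs) := by
      show stepH (rleA xs) b = _
      rw [stepH_eq_mergeH]
    simp only [contA, hfold]
    by_cases hb : b = p
    · subst hb
      rw [if_pos rfl, ih, mergeH_merge]
    · have hs : String.ofList [b] ≠ String.ofList [p] := fun h => hb (string_mk_single_inj b p h)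
      rw [if_neg hb, ih, mergeH_ne _ _ _ _ _ hs]

theorem coreA_eq_rleA (l : List Char) :
    (match l.foldl stepA (none, 1, ([] : List (String × Int))) with
     | (some q, cnt, cs) => cs ++ [(String.ofList [q], cnt)]
     | (none, _, cs) => cs) = rleA l := by
  cases l with
  | nil => rfl
  | cons x xs =>
    simp only [List.foldl_cons, stepA]
    rw [finA_eq_contA, contA_eq_foldr]
    show [] ++ _ = stepH (rleA xs) x
    rw [stepH_eq_mergeH]
    simp

-- every stepH result starts with the run of the character just pushed
theorem stepH_head (r : List (String × Int)) (x : Char) :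
    ∃ n t, stepH r x = (String.ofList [x], n) :: t := by
  cases r with
  | nil => exact ⟨1, [], rfl⟩
  | cons hd tl =>
    obtain ⟨s, c⟩ := hd
    by_cases hs : s = String.ofList [x]
    · exact ⟨c + 1, tl, by simp [stepH, hs]⟩
    · exact ⟨1, (s, c) :: tl, by simp [stepH, hs]⟩

theorem rleA_decomp (c : Char) (k : Nat) (rest : List Char) (hk : 1 ≤ k)
    (hrest : rest = [] ∨ ∃ d t, rest = d :: t ∧ d ≠ c) :
    rleA (List.replicate k c ++ rest) = (String.ofList [c], (k : Int)) :: rleA rest := by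
  have hd : ∀ s n t, rleA rest = (s, n) :: t → s ≠ String.ofList [c] := by
    rcases hrest with h | ⟨d, t0, h, hdc⟩
    · intro s n t hr; rw [h] at hr; exact absurd hr (by simp [rleA])
    · intro s n t hr
      have hre : rleA rest = stepH (rleA t0) d := by rw [h]; rfl
      obtain ⟨n', t', hst⟩ := stepH_head (rleA t0) d
      rw [hre, hst] at hr
      injection hr with h1 h2
      have hs : String.ofList [d] = s := congrArg Prod.fst h1
      intro hc
      exact hdc (string_mk_single_inj d c (hs.trans hc))
  have aux : ∀ k', 1 ≤ k' →
      List.foldr (fun x y => stepH y x) (rleA rest) (List.replicate k' c)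
        = (String.ofList [c], (k' : Int)) :: rleA rest := by
    intro k' hk'
    induction k' with
    | zero => omega
    | succ m ih =>
      by_cases hm : 1 ≤ m
      · rw [List.replicate_succ, List.foldr_cons, ih hm]
        simp only [stepH, if_true]
        push_cast
        ring_nf
      · have hm0 : m = 0 := by omega
        subst hm0
        simp only [List.replicate_succ, List.replicate_zero, List.foldr_cons, List.foldr_nil]
        match hr : rleA rest with
        | [] => simp [stepH]
        | (s, n) :: t =>
          have hne := hd s n t hr
          simp [stepH, hne]
  show List.foldr (fun x y => stepH y x) [] (List.replicate k c ++ rest)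
      = (String.ofList [c], (k : Int)) :: rleA rest
  rw [List.foldr_append]
  exact aux k hk

-- ---- B-side: boundaries and adjacent differences ----
def boundsOf (bs : List Char) : List Nat :=
  (List.range (bs.length + 1)).filter (fun i => boundaryP bs i)

def runFn (bs : List Char) (i j : Nat) : String × Int :=
  (String.ofList [bs.getD i ' '], ((j : Nat) : Int) - ((i : Nat) : Int))

def coreB (bs : List Char) : List (String × Int) :=
  List.zipWith (runFn bs) (boundsOf bs) (boundsOf bs).tail

theorem alt_eq (bits : String) : to_counts_alt bits = trimZeros (coreB bits.toList) := by
  unfold to_counts_alt coreB boundsOf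
  exact congrArg trimZeros (map_range_adj (runFn bits.toList) _)

theorem boundsOf_cons_zero (bs : List Char) : ∃ t, boundsOf bs = 0 :: t := by
  refine ⟨((List.range bs.length).map Nat.succ).filter (fun i => boundaryP bs i), ?_⟩
  rw [boundsOf, List.range_succ_eq_map, List.filter_cons, if_pos (by simp [boundaryP])]

theorem boundaryP_shift (c : Char) (k : Nat) (rest : List Char) (hk : 1 ≤ k)
    (hrest : rest = [] ∨ ∃ d t, rest = d :: t ∧ d ≠ c) (j : Nat) :
    boundaryP (List.replicate k c ++ rest) (k + j) = boundaryP rest j := by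
  cases j with
  | zero =>
    rcases hrest with h | ⟨d, t, h, hdc⟩
    · subst h
      simp [boundaryP]
    · subst h
      have h1 : (List.replicate k c ++ d :: t).getD k ' ' = d := by
        rw [getD_repl_right k c _ _ (by omega)]
        simp
      have h2 : (List.replicate k c ++ d :: t).getD (k - 1) ' ' = c :=
        getD_repl_left k c _ _ (by omega)
      simp only [Nat.add_zero, boundaryP, h1, h2]
      simp [hdc]
  | succ j' =>
    have h1 : (List.replicate k c ++ rest).getD (k + (j' + 1)) ' ' = rest.getD (j' + 1) ' ' := by
      rw [getD_repl_right k c _ _ (by omega)]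
      congr 1
      omega
    have h2 : (List.replicate k c ++ rest).getD (k + (j' + 1) - 1) ' ' = rest.getD j' ' ' := by
      rw [getD_repl_right k c _ _ (by omega)]
      congr 1
      omega
    have e0 : ((k + (j' + 1) : Nat) == 0) = false := by simp
    have e1 : ((k + (j' + 1) : Nat) == ((List.replicate k c ++ rest).length))
        = ((j' + 1 : Nat) == rest.length) := by
      simp only [List.length_append, List.length_replicate]
      by_cases h : j' + 1 = rest.length
      · simp [h]
      · simp [h]
    simp only [boundaryP, h1, h2, e0, e1, Nat.add_sub_cancel]
    simp

theorem bounds_decomp (c : Char) (k : Nat) (rest : List Char) (hk : 1 ≤ k)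
    (hrest : rest = [] ∨ ∃ d t, rest = d :: t ∧ d ≠ c) :
    boundsOf (List.replicate k c ++ rest) = 0 :: (boundsOf rest).map (· + k) := by
  have hlen : (List.replicate k c ++ rest).length = k + rest.length := by simp
  have part1 : (List.range k).filter
      (fun i => boundaryP (List.replicate k c ++ rest) i) = [0] := by
    obtain ⟨k0, rfl⟩ : ∃ k0, k = k0 + 1 := ⟨k - 1, by omega⟩
    rw [List.range_succ_eq_map, List.filter_cons, if_pos (by simp [boundaryP])]
    have hnil : ((List.range k0).map Nat.succ).filter
        (fun i => boundaryP (List.replicate (k0 + 1) c ++ rest) i) = [] := by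
      rw [List.filter_eq_nil_iff]
      intro a ha
      simp only [List.mem_map, List.mem_range] at ha
      obtain ⟨j, hj, rfl⟩ := ha
      have h1 : (List.replicate (k0 + 1) c ++ rest).getD (Nat.succ j) ' ' = c :=
        getD_repl_left _ _ _ _ (by omega)
      have h2 : (List.replicate (k0 + 1) c ++ rest).getD (Nat.succ j - 1) ' ' = c :=
        getD_repl_left _ _ _ _ (by omega)
      simp only [boundaryP, h1, h2, List.length_append, List.length_replicate]
      simp
      omega
    rw [hnil]
  have part2 : ((List.range (rest.length + 1)).map (fun x => k + x)).filter
      (fun i => boundaryP (List.replicate k c ++ rest) i) = (boundsOf rest).map (· + k) := by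
    rw [List.filter_map]
    have hcong : (List.range (rest.length + 1)).filter
        ((fun i => boundaryP (List.replicate k c ++ rest) i) ∘ (fun x => k + x))
        = (List.range (rest.length + 1)).filter (fun j => boundaryP rest j) := by
      apply List.filter_congr
      intro j hj
      exact boundaryP_shift c k rest hk hrest j
    rw [hcong]
    exact List.map_congr_left (fun a _ => Nat.add_comm k a)
  rw [boundsOf, hlen, show k + rest.length + 1 = k + (rest.length + 1) from rfl,
    List.range_add, List.filter_append, part1, part2]
  rfl

theorem zip_shift (k : Nat) (c : Char) (rest : List Char) (L : List Nat) :
    List.zipWith (runFn (List.replicate k c ++ rest)) (L.map (· + k)) ((L.map (· + k)).tail)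
      = List.zipWith (runFn rest) L L.tail := by
  rw [← List.map_tail, List.zipWith_map]
  have hfun : (fun a b => runFn (List.replicate k c ++ rest) (a + k) (b + k)) = runFn rest := by
    funext a b
    unfold runFn
    rw [getD_repl_right k c rest (a + k) (by omega), Nat.add_sub_cancel]
    have hcast : ((b + k : Nat) : Int) - ((a + k : Nat) : Int) = (b : Int) - (a : Int) := by
      push_cast
      ring
    rw [hcast]
  rw [hfun]

theorem coreB_decomp (c : Char) (k : Nat) (rest : List Char) (hk : 1 ≤ k)
    (hrest : rest = [] ∨ ∃ d t, rest = d :: t ∧ d ≠ c) :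
    coreB (List.replicate k c ++ rest) = (String.ofList [c], (k : Int)) :: coreB rest := by
  obtain ⟨t, ht⟩ := boundsOf_cons_zero rest
  have hz := zip_shift k c rest (0 :: t)
  rw [coreB, coreB, bounds_decomp c k rest hk hrest, ht]
  simp only [List.map_cons, List.tail_cons, List.zipWith_cons_cons, Nat.zero_add] at hz ⊢
  rw [hz]
  congr 1
  unfold runFn
  rw [getD_repl_left k c rest 0 (by omega)]
  simp

-- ---- main equivalence of the two cores ----
theorem rleA_eq_coreB_aux : ∀ (N : Nat) (l : List Char), l.length ≤ N → rleA l = coreB l := by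
  intro N
  induction N with
  | zero =>
    intro l hl
    have hnil : l = [] := List.eq_nil_of_length_eq_zero (by omega)
    subst hnil
    rfl
  | succ N ih =>
    intro l hl
    match l with
    | [] => rfl
    | x :: xs =>
      have hk1 : 1 ≤ ((x :: xs).takeWhile (fun y => y == x)).length := by
        rw [List.takeWhile_cons, if_pos (by simp)]
        simp
      have htake : (x :: xs).takeWhile (fun y => y == x)
          = List.replicate ((x :: xs).takeWhile (fun y => y == x)).length x := by
        apply List.eq_replicate_of_mem
        intro b hb
        have := List.mem_takeWhile_imp hb
        simpa using this
      have hdecomp : x :: xs = List.replicate ((x :: xs).takeWhile (fun y => y == x)).length x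
          ++ (x :: xs).dropWhile (fun y => y == x) := by
        conv_lhs => rw [← List.takeWhile_append_dropWhile (p := fun y => y == x) (l := x :: xs)]
        rw [← htake]
      have hrestcase : (x :: xs).dropWhile (fun y => y == x) = []
          ∨ ∃ d t, (x :: xs).dropWhile (fun y => y == x) = d :: t ∧ d ≠ x := by
        cases hr : (x :: xs).dropWhile (fun y => y == x) with
        | nil => exact Or.inl rfl
        | cons d t =>
          refine Or.inr ⟨d, t, rfl, ?_⟩
          have hh := List.head?_dropWhile_not (fun y => y == x) (x :: xs)
          rw [hr] at hh
          simp at hh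
          exact hh
      have hlen : ((x :: xs).dropWhile (fun y => y == x)).length ≤ N := by
        have hc := congrArg List.length hdecomp
        simp only [List.length_append, List.length_replicate, List.length_cons] at hc
        simp only [List.length_cons] at hl
        omega
      rw [hdecomp,
        rleA_decomp x _ _ hk1 hrestcase,
        coreB_decomp x _ _ hk1 hrestcase,
        ih _ hlen]

-- ===== VERDICT (by name: the statement is the Claim_ definition above) =====
theorem to_counts_spec : Claim_equal_to_counts := by
  intro bits _
  unfold Spec_to_counts to_counts
  rw [alt_eq, coreA_eq_rleA, rleA_eq_coreB_aux bits.toList.length bits.toList le_rfl]
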